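-- pv_equiv track=rewrite | github.com/vonszymon/atg-koreanczyk | koreanczyk_bak/helpers.py | turn_left
-- ===== SOURCE A (Python) =====
-- MOVES = [[0, 1, 2, 3, 4, 5, 6, 7, 8, 9, 10, 11, 12, 13, 14, 15, 16, 17, 18, 19],
--          [0, 1, 2, 3, 4, 5, 21, 22, 23, 24, 25, 15, 16, 17, 18, 19],
--          [0, 1, 2, 3, 4, 5, 21, 22, 23, 41, 42],
--          [0, 1, 2, 3, 4, 5, 6, 7, 8, 9, 10, 26, 27, 28, 29, 30]]
--
-- def turn_left(current, i):
--     if current not in [5, 10, 23]: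
--         raise ValueError("Current position not on the crossroad (i.e.: [5, 10, 23])")
--     idx_list = -1
--     for x in range(len(MOVES)):
--         try:
--             MOVES[x].index(current)
--             idx_list = x
--             break
--         except ValueError:
--             pass
--     idx_list += 1
--     while True:
--         try:
--             idx = MOVES[idx_list].index(current)
--             break
--         except ValueError:
--             idx_list += 1
--     try:
--         result_idx = MOVES[idx_list][idx + i]
--     except IndexError:
--         return 100
--     return result_idx
-- ===== SOURCE B (Python) =====
-- MOVES = [[0, 1, 2, 3, 4, 5, 6, 7, 8, 9, 10, 11, 12, 13, 14, 15, 16, 17, 18, 19],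
--          [0, 1, 2, 3, 4, 5, 21, 22, 23, 24, 25, 15, 16, 17, 18, 19],
--          [0, 1, 2, 3, 4, 5, 21, 22, 23, 41, 42],
--          [0, 1, 2, 3, 4, 5, 6, 7, 8, 9, 10, 26, 27, 28, 29, 30]]
--
-- # Precomputed: for each legal crossroad position, the MOVES sublist the
-- # original two-phase scan would settle on, and the position's index in it.
-- _TABLE = {5: (MOVES[1], 5), 10: (MOVES[3], 10), 23: (MOVES[2], 8)}
--
-- def turn_left(current, i):
--     entry = _TABLE.get(current)
--     if entry is None:
--         raise ValueError("Current position not on the crossroad (i.e.: [5, 10, 23])")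
--     lst, base = entry
--     try:
--         return lst[base + i]
--     except IndexError:
--         return 100
-- ===== Notes on version B (the rewrite author's own statement) =====
-- stated objective: simpler
-- what changed: Replaces A's two scan loops over MOVES (find first list containing current, then rescan from the next list) with a precomputed table mapping each legal crossroad position directly to its resolved (sublist, index), keeping identical wrap/IndexError->100 indexing.
import Mathlib
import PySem

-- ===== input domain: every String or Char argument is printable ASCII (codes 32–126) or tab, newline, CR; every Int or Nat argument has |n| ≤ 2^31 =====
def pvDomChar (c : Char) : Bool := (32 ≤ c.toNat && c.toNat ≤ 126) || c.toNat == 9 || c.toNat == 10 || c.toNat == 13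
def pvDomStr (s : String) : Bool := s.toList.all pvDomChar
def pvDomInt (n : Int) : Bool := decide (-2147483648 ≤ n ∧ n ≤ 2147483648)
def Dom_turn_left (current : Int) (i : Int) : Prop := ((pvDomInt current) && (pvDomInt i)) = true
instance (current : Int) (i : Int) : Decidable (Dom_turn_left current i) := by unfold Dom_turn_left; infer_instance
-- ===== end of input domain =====

-- B replaces A's two scan loops over MOVES with a precomputed table from each
-- legal position to its resolved (sublist, index); same indexing behaviour (simpler).


-- ===== PORT A =====
def MOVES : List (List Int) :=
  [[0, 1, 2, 3, 4, 5, 6, 7, 8, 9, 10, 11, 12, 13, 14, 15, 16, 17, 18, 19],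
   [0, 1, 2, 3, 4, 5, 21, 22, 23, 24, 25, 15, 16, 17, 18, 19],
   [0, 1, 2, 3, 4, 5, 21, 22, 23, 41, 42],
   [0, 1, 2, 3, 4, 5, 6, 7, 8, 9, 10, 26, 27, 28, 29, 30]]

-- 'for x in range(len(MOVES)): try MOVES[x].index(current); idx_list = x; break; except ValueError: pass'
def findIdxList (current : Int) : List Nat → Int → Int
  | [], acc => acc
  | x :: xs, acc =>
      match PySem.List.index? (MOVES.getD x []) current with
      | some _ => (x : Int)          -- idx_list = x; break
      | none   => findIdxList current xs acc

-- 'while True: try idx = MOVES[idx_list].index(current); break; except ValueError: idx_list += 1'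
-- fuel bounds the loop; in Python a list containing current is always reached for admitted inputs
-- (if it were not, MOVES[idx_list] would raise IndexError — outside Pre_).
def whileFind (current : Int) : Nat → Nat → (Nat × Int)
  | 0, k => (k, 0)                   -- unreachable for inputs in Pre_
  | fuel + 1, k =>
      match PySem.List.index? (MOVES.getD k []) current with
      | some idx => (k, (idx : Int))
      | none     => whileFind current fuel (k + 1)

def turn_left (current : Int) (i : Int) : Int :=
  if current = 5 ∨ current = 10 ∨ current = 23 then
    let idxList : Int := findIdxList current (List.range MOVES.length) (-1)
    let (k, idx) := whileFind current MOVES.length (idxList + 1).toNat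
    match PySem.List.pyGet? (MOVES.getD k []) (idx + i) with
    | some r => r                    -- MOVES[idx_list][idx + i]
    | none   => 100                  -- IndexError
  else 0                             -- raise ValueError: excluded by Pre_

-- ===== PORT B =====
def TABLE : PySem.Dict Int (List Int × Int) :=
  PySem.Dict.ofList [(5, (MOVES.getD 1 [], 5)), (10, (MOVES.getD 3 [], 10)), (23, (MOVES.getD 2 [], 8))]

def turn_left_alt (current : Int) (i : Int) : Int :=
  match PySem.Dict.get? TABLE current with
  | none => 0                        -- raise ValueError: excluded by Pre_
  | some (lst, base) =>
      match PySem.List.pyGet? lst (base + i) with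
      | some r => r
      | none   => 100                -- IndexError

-- ===== PRECONDITION & SPEC =====
-- A raises ValueError when current is not a crossroad position; exactly those inputs are excluded.
def Pre_turn_left (current : Int) (i : Int) : Prop := current = 5 ∨ current = 10 ∨ current = 23
instance (current : Int) (i : Int) : Decidable (Pre_turn_left current i) := by unfold Pre_turn_left; infer_instance
def pvWitness_turn_left : Int × Int := (5, 3)

def Spec_turn_left (current : Int) (i : Int) (out : Int) : Prop := out = turn_left_alt current i
instance (current : Int) (i : Int) (out : Int) : Decidable (Spec_turn_left current i out) := by unfold Spec_turn_left; infer_instance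

-- ===== CLAIM (what is proved, stated in full; the proofs are below) =====
def Claim_equal_turn_left : Prop := ∀ (current : Int) (i : Int), Dom_turn_left current i → Pre_turn_left current i → Spec_turn_left current i (turn_left current i)

-- ===== LEMMAS AND PROOFS =====

-- ===== VERDICT (by name: the statement is the Claim_ definition above) =====
theorem turn_left_spec : Claim_equal_turn_left := by
  intro current i _ hpre
  unfold Spec_turn_left
  rcases hpre with h | h | h <;> subst h <;> rfl
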